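-- pv_equiv track=rewrite | github.com/rabiloo/wiki-extractor | wiki_extractor/utils/text_utils.py | split_parts
-- ===== SOURCE A (Python) =====
-- def split_parts(text):
--     """
--     Split template or function parameters by pipes, respecting nested structures.
--
--     Args:
--         text: Text to split
--
--     Returns:
--         List of parameter parts
--     """
--     parts = []
--     current = ''
--     depth = 0
--
--     i = 0
--     while i < len(text):
--         char = text[i]
--
--         if char == '{':
--             if i + 1 < len(text) and text[i + 1] == '{':
--                 depth += 1
--                 current += '{{'
--                 i += 2
--                 continue
--         elif char == '}':
--             if i + 1 < len(text) and text[i + 1] == '}':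
--                 depth -= 1
--                 current += '}}'
--                 i += 2
--                 continue
--         elif char == '[':
--             if i + 1 < len(text) and text[i + 1] == '[':
--                 depth += 1
--                 current += '[['
--                 i += 2
--                 continue
--         elif char == ']':
--             if i + 1 < len(text) and text[i + 1] == ']':
--                 depth -= 1
--                 current += ']]'
--                 i += 2
--                 continue
--         elif char == '|' and depth == 0:
--             parts.append(current)
--             current = ''
--             i += 1
--             continue
--
--         current += char
--         i += 1
--
--     if current:
--         parts.append(current)
--
--     return parts
-- ===== SOURCE B (Python) =====
-- def _cut(text):
--     """Scan for the first top-level pipe; return (text before it, text after it),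
--     or (text, None) if there is no top-level pipe."""
--     depth = 0
--     i = 0
--     n = len(text)
--     while i < n:
--         if text[i] == '|' and depth == 0:
--             return text[:i], text[i + 1:]
--         pair = text[i:i + 2]
--         if pair == '{{' or pair == '[[':
--             depth += 1
--             i += 2
--         elif pair == '}}' or pair == ']]':
--             depth -= 1
--             i += 2
--         else:
--             i += 1
--     return text, None
--
--
-- def split_parts(text):
--     parts = []
--     while True:
--         head, rest = _cut(text)
--         if rest is None:
--             if head:
--                 parts.append(head)
--             return parts
--         parts.append(head)
--         text = rest
-- ===== Notes on version B (the rewrite author's own statement) =====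
-- stated objective: alternative
-- what changed: Replaces A's single accumulator scan (building each part character by character alongside parts/depth state) with a repeated cut decomposition: a helper finds the first top-level pipe by index and slices the text there, and the outer loop collects the head slices until no top-level pipe remains.
import Mathlib
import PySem

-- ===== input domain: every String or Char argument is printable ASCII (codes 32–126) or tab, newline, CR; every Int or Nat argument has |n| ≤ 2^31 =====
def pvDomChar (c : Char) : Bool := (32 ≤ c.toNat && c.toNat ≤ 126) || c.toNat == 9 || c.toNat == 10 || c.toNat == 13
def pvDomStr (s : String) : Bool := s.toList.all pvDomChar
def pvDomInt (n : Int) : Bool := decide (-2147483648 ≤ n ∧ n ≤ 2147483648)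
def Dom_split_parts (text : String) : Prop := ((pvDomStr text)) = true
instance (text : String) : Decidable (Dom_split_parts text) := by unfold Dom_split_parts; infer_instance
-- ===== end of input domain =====

-- B re-decomposes A's single accumulator scan into repeated "cut at the first
-- top-level pipe" slicing; same return value, alternative structure (not claimed faster).

-- ===== PORT A =====
-- A's while loop: state (parts, current, depth), consuming one or two chars per step.
def loopA : List Char → List String → List Char → Int → List String
  | '{' :: '{' :: rest, parts, cur, d => loopA rest parts (cur ++ ['{', '{']) (d + 1)
  | '}' :: '}' :: rest, parts, cur, d => loopA rest parts (cur ++ ['}', '}']) (d - 1)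
  | '[' :: '[' :: rest, parts, cur, d => loopA rest parts (cur ++ ['[', '[']) (d + 1)
  | ']' :: ']' :: rest, parts, cur, d => loopA rest parts (cur ++ [']', ']']) (d - 1)
  | '|' :: rest, parts, cur, d =>
      if d = 0 then loopA rest (parts ++ [String.ofList cur]) [] d
      else loopA rest parts (cur ++ ['|']) d
  | c :: rest, parts, cur, d => loopA rest parts (cur ++ [c]) d
  | [], parts, cur, _ => if cur = [] then parts else parts ++ [String.ofList cur]

def split_parts (text : String) : List String := loopA text.toList [] [] 0

-- ===== PORT B =====
-- B's _cut: index scan with two-char slices; returns (text[:i], some text[i+1:]) at the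
-- first top-level pipe, (text, none) otherwise.
def cutBGo : Nat → List Char → Int → Nat → List Char × Option (List Char)
  | 0, text, _, _ => (text, none)
  | fuel + 1, text, d, i =>
    if h : i < text.length then
      if text[i] = '|' ∧ d = 0 then (text.take i, some (text.drop (i + 1)))
      else if (text.drop i).take 2 = ['{', '{'] ∨ (text.drop i).take 2 = ['[', '['] then
        cutBGo fuel text (d + 1) (i + 2)
      else if (text.drop i).take 2 = ['}', '}'] ∨ (text.drop i).take 2 = [']', ']'] then
        cutBGo fuel text (d - 1) (i + 2)
      else cutBGo fuel text d (i + 1)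
    else (text, none)

def cutB (text : List Char) (d : Int) (i : Nat) : List Char × Option (List Char) :=
  cutBGo (text.length - i) text d i

-- B's outer loop: repeatedly cut, collecting heads; drop the last head iff empty.
-- (fuel makes the loop total; each cut strictly shortens the text, so it never runs out)
def loopBGo : Nat → List Char → List String → List String
  | 0, _, parts => parts
  | fuel + 1, text, parts =>
    match cutB text 0 0 with
    | (head, none) => if head = [] then parts else parts ++ [String.ofList head]
    | (head, some rest) => loopBGo fuel rest (parts ++ [String.ofList head])

def split_parts_alt (text : String) : List String := loopBGo (text.toList.length + 1) text.toList []

-- ===== PRECONDITION & SPEC =====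
def Spec_split_parts (text : String) (out : List String) : Prop := out = split_parts_alt text
instance (text : String) (out : List String) : Decidable (Spec_split_parts text out) := by unfold Spec_split_parts; infer_instance

-- ===== CLAIM (what is proved, stated in full; the proofs are below) =====
def Claim_equal_split_parts : Prop := ∀ (text : String), Dom_split_parts text → Spec_split_parts text (split_parts text)

-- ===== LEMMAS AND PROOFS =====

-- Proof-side structural version of B's cut (consumes the list like A does).
def cutCore : List Char → Int → List Char × Option (List Char)
  | [], _ => ([], none)
  | c :: rest, d =>
    if c = '|' ∧ d = 0 then ([], some rest)
    else if (c :: rest).take 2 = ['{', '{'] ∨ (c :: rest).take 2 = ['[', '['] then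
      let p := cutCore (rest.drop 1) (d + 1); ((c :: rest).take 2 ++ p.1, p.2)
    else if (c :: rest).take 2 = ['}', '}'] ∨ (c :: rest).take 2 = [']', ']'] then
      let p := cutCore (rest.drop 1) (d - 1); ((c :: rest).take 2 ++ p.1, p.2)
    else
      let p := cutCore rest d; (c :: p.1, p.2)
termination_by cs _ => cs.length
decreasing_by all_goals (simp only [List.length_drop, List.length_cons]; omega)

theorem drop_cons_self (text : List Char) (i : Nat) (h : i < text.length) :
    text.drop i = text[i] :: text.drop (i + 1) := by
  exact List.drop_eq_getElem_cons h

theorem cutBGo_eq_core (text : List Char) (fuel : Nat) :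
    ∀ (d : Int) (i : Nat), text.length ≤ i + fuel →
      cutBGo fuel text d i
        = (text.take i ++ (cutCore (text.drop i) d).1, (cutCore (text.drop i) d).2) := by
  induction fuel with
  | zero =>
    intro d i hle
    rw [cutBGo, List.drop_of_length_le (by omega), List.take_of_length_le (by omega), cutCore]
    simp
  | succ fuel ih =>
    intro d i hle
    rw [cutBGo]
    by_cases hlt : i < text.length
    · rw [dif_pos hlt]
      by_cases hp : text[i] = '|' ∧ d = 0
      · rw [if_pos hp, drop_cons_self text i hlt, cutCore]
        simp [hp.1, hp.2]
      · rw [if_neg hp]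
        have hd : text.drop i = text[i] :: text.drop (i + 1) := drop_cons_self text i hlt
        have hdd : (text.drop (i + 1)).drop 1 = text.drop (i + 2) := by
          rw [List.drop_drop]
        by_cases hpair : (text.drop i).take 2 = ['{', '{'] ∨ (text.drop i).take 2 = ['[', '[']
        · rw [if_pos hpair, ih (d + 1) (i + 2) (by omega)]
          rw [hd] at hpair
          have hc1 : text[i] = '{' ∨ text[i] = '[' := by
            rcases hpair with h | h
            · simp only [List.take_succ_cons] at h
              exact Or.inl (List.cons_eq_cons.mp h).1
            · simp only [List.take_succ_cons] at h
              exact Or.inr (List.cons_eq_cons.mp h).1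
          have hcc : cutCore (text.drop i) d =
              ((text.drop i).take 2 ++ (cutCore (text.drop (i + 2)) (d + 1)).1,
                (cutCore (text.drop (i + 2)) (d + 1)).2) := by
            conv_lhs => rw [hd, cutCore]
            rw [if_neg (by rintro ⟨h1, h2⟩; rcases hc1 with h | h <;> simp [h] at h1),
              if_pos hpair, hdd, ← hd]
          rw [hcc, List.take_add]
          simp
        · rw [if_neg hpair]
          by_cases hpair2 : (text.drop i).take 2 = ['}', '}'] ∨ (text.drop i).take 2 = [']', ']']
          · rw [if_pos hpair2, ih (d - 1) (i + 2) (by omega)]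
            rw [hd] at hpair2
            have hc1 : text[i] = '}' ∨ text[i] = ']' := by
              rcases hpair2 with h | h
              · simp only [List.take_succ_cons] at h
                exact Or.inl (List.cons_eq_cons.mp h).1
              · simp only [List.take_succ_cons] at h
                exact Or.inr (List.cons_eq_cons.mp h).1
            have hcc : cutCore (text.drop i) d =
                ((text.drop i).take 2 ++ (cutCore (text.drop (i + 2)) (d - 1)).1,
                  (cutCore (text.drop (i + 2)) (d - 1)).2) := by
              conv_lhs => rw [hd, cutCore]
              rw [if_neg (by rintro ⟨h1, h2⟩; rcases hc1 with h | h <;> simp [h] at h1),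
                if_neg (by rw [← hd]; exact hpair),
                if_pos hpair2, hdd, ← hd]
            rw [hcc, List.take_add]
            simp
          · rw [if_neg hpair2, ih d (i + 1) (by omega)]
            have hcc : cutCore (text.drop i) d =
                (text[i] :: (cutCore (text.drop (i + 1)) d).1,
                  (cutCore (text.drop (i + 1)) d).2) := by
              conv_lhs => rw [hd, cutCore]
              rw [if_neg hp,
                if_neg (by rw [← hd]; exact hpair),
                if_neg (by rw [← hd]; exact hpair2)]
            rw [hcc]
            have h1 : List.take (i + 1) text = List.take i text ++ [text[i]] := by
              rw [List.take_add_one, List.getElem?_eq_getElem hlt]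
              simp
            rw [h1, List.append_assoc, List.singleton_append]
    · rw [dif_neg hlt]
      rw [List.drop_of_length_le (by omega), List.take_of_length_le (by omega), cutCore]
      simp

theorem cutB_eq_core (text : List Char) (d : Int) (i : Nat) :
    cutB text d i = (text.take i ++ (cutCore (text.drop i) d).1, (cutCore (text.drop i) d).2) := by
  rw [cutB]
  exact cutBGo_eq_core text (text.length - i) d i (by omega)

theorem cutBGo_rest_lt (text : List Char) (fuel : Nat) :
    ∀ (d : Int) (i : Nat) (s r), cutBGo fuel text d i = (s, some r) → r.length < text.length := by
  induction fuel with
  | zero => intro d i s r he; rw [cutBGo] at he; exact absurd he (by simp)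
  | succ fuel ih =>
    intro d i s r he
    rw [cutBGo] at he
    by_cases hlt : i < text.length
    · rw [dif_pos hlt] at he
      split_ifs at he with h1 h2 h3
      · obtain ⟨-, he⟩ := Prod.mk.injEq .. ▸ he
        cases he; simp; omega
      · exact ih _ _ _ _ he
      · exact ih _ _ _ _ he
      · exact ih _ _ _ _ he
    · rw [dif_neg hlt] at he
      exact absurd he (by simp)

theorem cutCore_rest_lt (cs : List Char) (d : Int) (s r) :
    cutCore cs d = (s, some r) → r.length < cs.length := by
  intro he
  have h := cutB_eq_core cs d 0
  simp only [List.take_zero, List.drop_zero, List.nil_append, he] at h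
  rw [cutB] at h
  exact cutBGo_rest_lt cs (cs.length - 0) d 0 _ _ h

theorem loopA_core (cs : List Char) (d : Int) (parts : List String) (cur : List Char) :
    loopA cs parts cur d =
      match cutCore cs d with
      | (seg, none) => if cur ++ seg = [] then parts else parts ++ [String.ofList (cur ++ seg)]
      | (seg, some rest) => loopA rest (parts ++ [String.ofList (cur ++ seg)]) [] 0 := by
  fun_induction loopA cs parts cur d with
  | case1 rest parts cur d ih =>
    rw [ih]
    have hcc : cutCore ('{' :: '{' :: rest) d =
        ('{' :: '{' :: (cutCore rest (d + 1)).1, (cutCore rest (d + 1)).2) := by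
      rw [cutCore]; simp
    rw [hcc]
    rcases hq : cutCore rest (d + 1) with ⟨s, r⟩
    cases r <;> simp
  | case2 rest parts cur d ih =>
    rw [ih]
    have hcc : cutCore ('}' :: '}' :: rest) d =
        ('}' :: '}' :: (cutCore rest (d - 1)).1, (cutCore rest (d - 1)).2) := by
      rw [cutCore]; simp
    rw [hcc]
    rcases hq : cutCore rest (d - 1) with ⟨s, r⟩
    cases r <;> simp
  | case3 rest parts cur d ih =>
    rw [ih]
    have hcc : cutCore ('[' :: '[' :: rest) d =
        ('[' :: '[' :: (cutCore rest (d + 1)).1, (cutCore rest (d + 1)).2) := by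
      rw [cutCore]; simp
    rw [hcc]
    rcases hq : cutCore rest (d + 1) with ⟨s, r⟩
    cases r <;> simp
  | case4 rest parts cur d ih =>
    rw [ih]
    have hcc : cutCore (']' :: ']' :: rest) d =
        (']' :: ']' :: (cutCore rest (d - 1)).1, (cutCore rest (d - 1)).2) := by
      rw [cutCore]; simp
    rw [hcc]
    rcases hq : cutCore rest (d - 1) with ⟨s, r⟩
    cases r <;> simp
  | case5 rest parts cur ih =>
    have hcc : cutCore ('|' :: rest) 0 = ([], some rest) := by
      rw [cutCore]; simp
    rw [hcc]
    simp
  | case6 rest parts cur d hd0 ih =>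
    rw [ih]
    have hcc : cutCore ('|' :: rest) d = ('|' :: (cutCore rest d).1, (cutCore rest d).2) := by
      rw [cutCore]; simp [hd0]
    rw [hcc]
    rcases hq : cutCore rest d with ⟨s, r⟩
    cases r <;> simp
  | case7 c rest parts cur d h1 h2 h3 h4 h5 ih =>
    rw [ih]
    have hp : ¬(c = '|' ∧ d = 0) := fun h => h5 h.1
    have n1 : ¬((c :: rest).take 2 = ['{', '{'] ∨ (c :: rest).take 2 = ['[', '[']) := by
      rintro (h | h) <;>
        (rw [List.take_succ_cons] at h
         obtain ⟨hc0, ht⟩ := List.cons_eq_cons.mp h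
         cases rest with
         | nil => simp at ht
         | cons r rs =>
           rw [List.take_succ_cons, List.take_zero] at ht
           obtain ⟨hr, -⟩ := List.cons_eq_cons.mp ht
           first
             | exact h1 rs hc0 (by rw [hr])
             | exact h3 rs hc0 (by rw [hr]))
    have n2 : ¬((c :: rest).take 2 = ['}', '}'] ∨ (c :: rest).take 2 = [']', ']']) := by
      rintro (h | h) <;>
        (rw [List.take_succ_cons] at h
         obtain ⟨hc0, ht⟩ := List.cons_eq_cons.mp h
         cases rest with
         | nil => simp at ht
         | cons r rs =>
           rw [List.take_succ_cons, List.take_zero] at ht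
           obtain ⟨hr, -⟩ := List.cons_eq_cons.mp ht
           first
             | exact h2 rs hc0 (by rw [hr])
             | exact h4 rs hc0 (by rw [hr]))
    have hcc : cutCore (c :: rest) d = (c :: (cutCore rest d).1, (cutCore rest d).2) := by
      rw [cutCore, if_neg hp, if_neg n1, if_neg n2]
    rw [hcc]
    rcases hq : cutCore rest d with ⟨s, r⟩
    cases r <;> simp
  | case8 parts d =>
    rw [cutCore]
    simp
  | case9 parts cur d hcur =>
    rw [cutCore]
    simp [hcur]

theorem loopA_eq_loopBGo (fuel : Nat) :
    ∀ (cs : List Char) (parts : List String), cs.length < fuel →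
      loopA cs parts [] 0 = loopBGo fuel cs parts := by
  induction fuel with
  | zero => intro cs parts h; omega
  | succ fuel ih =>
    intro cs parts h
    rw [loopBGo, loopA_core]
    have hB := cutB_eq_core cs 0 0
    simp only [List.take_zero, List.drop_zero, List.nil_append] at hB
    rw [hB]
    rcases hco : cutCore cs 0 with ⟨s, r⟩
    cases r with
    | none => simp
    | some rest =>
      simp only [List.nil_append]
      exact ih rest _ (by have := cutCore_rest_lt cs 0 _ _ hco; omega)

-- ===== VERDICT (by name: the statement is the Claim_ definition above) =====
theorem split_parts_spec : Claim_equal_split_parts := by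
  intro text _
  unfold Spec_split_parts split_parts split_parts_alt
  exact loopA_eq_loopBGo _ _ _ (by omega)
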